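-- pv_equiv track=rewrite | github.com/BaptisteVolle/riftbound-app | tools/generate-card-image-index.py | parse_object_literals
-- ===== SOURCE A (Python) =====
-- def parse_object_literals(array_body):
--     candidates = []
--     depth = 0
--     start = None
--     in_string = False
--     escaped = False
--
--     for index, character in enumerate(array_body):
--         if in_string:
--             if escaped:
--                 escaped = False
--             elif character == "\\":
--                 escaped = True
--             elif character == '"':
--                 in_string = False
--             continue
--
--         if character == '"':
--             in_string = True
--         elif character == "{":
--             if depth == 0:
--                 start = index
--             depth += 1
--         elif character == "}":
--             depth -= 1
--             if depth == 0 and start is not None: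
--                 candidates.append(array_body[start : index + 1])
--                 start = None
--
--     return candidates
-- ===== SOURCE B (Python) =====
-- def parse_object_literals(array_body):
--     # Pass 1: boolean mask, in_string_at[i] == True iff character i lies inside
--     # a double-quoted string literal (backslash escapes handled).
--     in_string_at = []
--     in_string = False
--     escaped = False
--     for ch in array_body:
--         in_string_at.append(in_string)
--         if in_string:
--             if escaped:
--                 escaped = False
--             elif ch == "\\":
--                 escaped = True
--             elif ch == '"':
--                 in_string = False
--         elif ch == '"':
--             in_string = True
--     # Pass 2: purely structural scan of the non-string characters.
--     out = []
--     depth = 0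
--     start = None
--     for index, (ch, inside) in enumerate(zip(array_body, in_string_at)):
--         if inside or ch == '"':
--             continue
--         if ch == "{":
--             if depth == 0:
--                 start = index
--             depth += 1
--         elif ch == "}":
--             depth -= 1
--             if depth == 0 and start is not None:
--                 out.append(array_body[start:index + 1])
--                 start = None
--     return out
-- ===== Notes on version B (the rewrite author's own statement) =====
-- stated objective: alternative
-- what changed: B separates the lexing from the parsing: a first pass builds an in-string boolean mask (with escape handling) and a second pass scans only the non-string characters maintaining depth/start, instead of A's single loop interleaving string state with brace tracking.
import Mathlib
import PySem

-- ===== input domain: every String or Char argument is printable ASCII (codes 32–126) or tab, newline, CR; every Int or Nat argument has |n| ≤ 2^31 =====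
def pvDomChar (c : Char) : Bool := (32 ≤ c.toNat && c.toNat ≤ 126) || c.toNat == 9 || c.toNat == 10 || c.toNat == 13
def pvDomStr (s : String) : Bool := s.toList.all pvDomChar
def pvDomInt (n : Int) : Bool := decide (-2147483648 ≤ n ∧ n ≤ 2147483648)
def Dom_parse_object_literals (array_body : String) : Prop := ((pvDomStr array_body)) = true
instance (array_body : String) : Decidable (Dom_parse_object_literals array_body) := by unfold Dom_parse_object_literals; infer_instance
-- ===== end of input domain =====

-- B separates lexing (an in-string mask pass) from parsing (a structural brace scan); alternative decomposition, same cost.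


-- ===== PORT A =====
-- single loop carrying (candidates, depth, start, in_string, escaped), exactly A's branches
def polLoopA (full : List Char) : List Char → Nat → List String → Int → Option Nat → Bool → Bool → List String
  | [], _, cand, _, _, _, _ => cand
  | c :: rest, index, cand, depth, start, in_string, escaped =>
    if in_string then
      if escaped then polLoopA full rest (index + 1) cand depth start in_string false
      else if c = '\\' then polLoopA full rest (index + 1) cand depth start in_string true
      else if c = '"' then polLoopA full rest (index + 1) cand depth start false escaped
      else polLoopA full rest (index + 1) cand depth start in_string escaped
    else if c = '"' then polLoopA full rest (index + 1) cand depth start true escaped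
    else if c = '{' then
      polLoopA full rest (index + 1) cand (depth + 1)
        (if depth = 0 then some index else start) in_string escaped
    else if c = '}' then
      match start with
      | some s =>
          if depth - 1 = 0 then
            polLoopA full rest (index + 1)
              (cand ++ [String.ofList (PySem.List.slice full (some (s : Int)) (some ((index : Int) + 1)))])
              (depth - 1) none in_string escaped
          else polLoopA full rest (index + 1) cand (depth - 1) start in_string escaped
      | none => polLoopA full rest (index + 1) cand (depth - 1) none in_string escaped
    else polLoopA full rest (index + 1) cand depth start in_string escaped

def parse_object_literals (array_body : String) : List String :=
  polLoopA array_body.toList array_body.toList 0 [] 0 none false false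

-- ===== PORT B =====
-- pass 1: in-string mask (True iff the character lies inside a string literal)
def polMask : List Char → Bool → Bool → List Bool
  | [], _, _ => []
  | c :: rest, in_string, escaped =>
    in_string ::
      (if in_string then
        if escaped then polMask rest in_string false
        else if c = '\\' then polMask rest in_string true
        else if c = '"' then polMask rest false escaped
        else polMask rest in_string escaped
      else if c = '"' then polMask rest true escaped
      else polMask rest in_string escaped)

-- pass 2: structural scan of the non-string characters, carrying only (out, depth, start)
def polLoopB (full : List Char) : List (Char × Bool) → Nat → List String → Int → Option Nat → List String
  | [], _, out, _, _ => out
  | (c, inside) :: rest, index, out, depth, start =>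
    if inside || c = '"' then polLoopB full rest (index + 1) out depth start
    else if c = '{' then
      polLoopB full rest (index + 1) out (depth + 1) (if depth = 0 then some index else start)
    else if c = '}' then
      match start with
      | some s =>
          if depth - 1 = 0 then
            polLoopB full rest (index + 1)
              (out ++ [String.ofList (PySem.List.slice full (some (s : Int)) (some ((index : Int) + 1)))])
              (depth - 1) none
          else polLoopB full rest (index + 1) out (depth - 1) start
      | none => polLoopB full rest (index + 1) out (depth - 1) none
    else polLoopB full rest (index + 1) out depth start

def parse_object_literals_alt (array_body : String) : List String :=
  let cs := array_body.toList
  polLoopB cs (cs.zip (polMask cs false false)) 0 [] 0 none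

-- ===== PRECONDITION & SPEC =====
def Spec_parse_object_literals (array_body : String) (out : List String) : Prop := out = parse_object_literals_alt array_body
instance (array_body : String) (out : List String) : Decidable (Spec_parse_object_literals array_body out) := by unfold Spec_parse_object_literals; infer_instance

-- ===== CLAIM (what is proved, stated in full; the proofs are below) =====
def Claim_equal_parse_object_literals : Prop := ∀ (array_body : String), Dom_parse_object_literals array_body → Spec_parse_object_literals array_body (parse_object_literals array_body)

-- ===== LEMMAS AND PROOFS =====

-- A's single loop equals B's structural scan over the chars zipped with the mask
-- for the same string state, by induction in lockstep.
theorem polLoopA_eq_loopB (full : List Char) (cs : List Char) :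
    ∀ (index : Nat) (cand : List String) (depth : Int) (start : Option Nat)
      (ins esc : Bool),
      polLoopA full cs index cand depth start ins esc =
        polLoopB full (cs.zip (polMask cs ins esc)) index cand depth start := by
  induction cs with
  | nil => intros; simp [polLoopA, polLoopB, polMask]
  | cons c rest ih =>
    intro index cand depth start ins esc
    by_cases hins : ins = true
    · subst hins
      by_cases hesc : esc = true
      · subst hesc
        simp [polLoopA, polMask, polLoopB, ih]
      · replace hesc : esc = false := by simpa using hesc
        subst hesc
        by_cases hbs : c = '\\'
        · subst hbs; simp [polLoopA, polMask, polLoopB, ih]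
        · by_cases hq : c = '"'
          · subst hq; simp [polLoopA, polMask, polLoopB, ih]
          · simp [polLoopA, polMask, polLoopB, hbs, hq, ih]
    · replace hins : ins = false := by simpa using hins
      subst hins
      by_cases hq : c = '"'
      · subst hq; simp [polLoopA, polMask, polLoopB, ih]
      · by_cases hob : c = '{'
        · subst hob; simp [polLoopA, polMask, polLoopB, ih]
        · by_cases hcb : c = '}'
          · subst hcb
            simp only [polLoopA, polMask, hq, if_false]
            · cases start with
              | none => simp [polLoopB, hq, ih]
              | some s => by_cases hd : depth - 1 = 0 <;>
                  simp [polLoopB, hq, hd, ih]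
          · simp [polLoopA, polMask, polLoopB, hq, hob, hcb, ih]

-- ===== VERDICT (by name: the statement is the Claim_ definition above) =====
theorem parse_object_literals_spec : Claim_equal_parse_object_literals := by
  intro s _
  unfold Spec_parse_object_literals parse_object_literals parse_object_literals_alt
  exact polLoopA_eq_loopB _ _ 0 [] 0 none false false
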